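-- pv_equiv track=rewrite | github.com/Mohido/FPC_Grading_Engine | main.py | progress_count
-- ===== SOURCE A (Python) =====
-- def progress_count(rowIDs, row_data):
--     accum = 0
--     for pt in row_data:
--         pt_score = pt[1]
--         while (pt_score >= 50):
--             accum += 1
--             pt_score -= 100
--     return accum
-- ===== SOURCE B (Python) =====
-- def progress_count(rowIDs, row_data):
--     return sum(max(0, (pt[1] - 50) // 100 + 1) for pt in row_data)
-- ===== Notes on version B (the rewrite author's own statement) =====
-- stated objective: simpler
-- what changed: Replaces the inner repeated-subtraction while loop with a closed-form floor-division count per point, summed in one expression.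
import Mathlib
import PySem

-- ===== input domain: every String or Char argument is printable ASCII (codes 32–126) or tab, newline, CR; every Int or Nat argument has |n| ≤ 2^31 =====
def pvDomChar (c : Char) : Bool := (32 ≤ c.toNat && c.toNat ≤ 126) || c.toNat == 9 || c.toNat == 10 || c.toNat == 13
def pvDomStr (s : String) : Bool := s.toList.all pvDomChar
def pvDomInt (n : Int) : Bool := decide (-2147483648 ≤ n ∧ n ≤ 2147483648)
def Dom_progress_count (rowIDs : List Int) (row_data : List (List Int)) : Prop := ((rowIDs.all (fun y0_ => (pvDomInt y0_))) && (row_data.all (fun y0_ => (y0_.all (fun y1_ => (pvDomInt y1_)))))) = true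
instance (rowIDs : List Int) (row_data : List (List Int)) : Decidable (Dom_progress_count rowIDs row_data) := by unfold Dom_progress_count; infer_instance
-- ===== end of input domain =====

-- B replaces the inner repeated-subtraction while loop with a closed-form floor-division count per point (simpler).


-- ===== PORT A =====
-- the inner 'while pt_score >= 50: accum += 1; pt_score -= 100' loop
def pvAWhile (pt_score accum : Int) : Int :=
  if 50 ≤ pt_score then pvAWhile (pt_score - 100) (accum + 1) else accum
termination_by (pt_score + 50).toNat
decreasing_by omega

-- pt[1] via pyGet?; Pre_ guarantees it is 'some' (the .getD 0 is never reached inside Pre_)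
def progress_count (rowIDs : List Int) (row_data : List (List Int)) : Int :=
  row_data.foldl (fun accum pt => pvAWhile ((PySem.List.pyGet? pt 1).getD 0) accum) 0

-- ===== PORT B =====
def progress_count_alt (rowIDs : List Int) (row_data : List (List Int)) : Int :=
  (row_data.map (fun pt => max 0 (PySem.Int.floordiv ((PySem.List.pyGet? pt 1).getD 0 - 50) 100 + 1))).sum

-- ===== PRECONDITION & SPEC =====
-- A (and B) raise IndexError on pt[1] for any row with fewer than 2 entries; exactly those inputs are excluded.
def Pre_progress_count (rowIDs : List Int) (row_data : List (List Int)) : Prop :=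
  ∀ pt ∈ row_data, 2 ≤ pt.length
instance (rowIDs : List Int) (row_data : List (List Int)) : Decidable (Pre_progress_count rowIDs row_data) := by unfold Pre_progress_count; infer_instance
def pvWitness_progress_count : List Int × List (List Int) := ([1, 2], [[1, 160], [2, 49]])

def Spec_progress_count (rowIDs : List Int) (row_data : List (List Int)) (out : Int) : Prop := out = progress_count_alt rowIDs row_data
instance (rowIDs : List Int) (row_data : List (List Int)) (out : Int) : Decidable (Spec_progress_count rowIDs row_data out) := by unfold Spec_progress_count; infer_instance

-- ===== CLAIM (what is proved, stated in full; the proofs are below) =====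
def Claim_equal_progress_count : Prop := ∀ (rowIDs : List Int) (row_data : List (List Int)), Dom_progress_count rowIDs row_data → Pre_progress_count rowIDs row_data → Spec_progress_count rowIDs row_data (progress_count rowIDs row_data)

-- ===== LEMMAS AND PROOFS =====

-- the closed form of one point's contribution
def pvCount (s : Int) : Int := max 0 (PySem.Int.floordiv (s - 50) 100 + 1)

theorem pvCount_eq (s : Int) : pvCount s = max 0 ((s - 50) / 100 + 1) := by
  unfold pvCount
  rw [PySem.Int.floordiv_eq_ediv_of_pos (by omega)]

theorem pvAWhile_eq (s a : Int) : pvAWhile s a = a + pvCount s := by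
  induction s, a using pvAWhile.induct with
  | case1 s a h ih =>
    rw [pvAWhile, if_pos h, ih, pvCount_eq, pvCount_eq]
    omega
  | case2 s a h =>
    rw [pvAWhile, if_neg h, pvCount_eq]
    omega

theorem pvFoldl_eq (l : List (List Int)) (a : Int) :
    l.foldl (fun accum pt => pvAWhile ((PySem.List.pyGet? pt 1).getD 0) accum) a
      = a + (l.map (fun pt => max 0 (PySem.Int.floordiv ((PySem.List.pyGet? pt 1).getD 0 - 50) 100 + 1))).sum := by
  induction l generalizing a with
  | nil => simp
  | cons pt rest ih =>
    rw [List.foldl_cons, pvAWhile_eq ((PySem.List.pyGet? pt 1).getD 0) a,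
      ih, List.map_cons, List.sum_cons]
    unfold pvCount
    ring

-- ===== VERDICT (by name: the statement is the Claim_ definition above) =====
theorem progress_count_spec : Claim_equal_progress_count := by
  intro rowIDs row_data _ _
  show progress_count rowIDs row_data = progress_count_alt rowIDs row_data
  unfold progress_count progress_count_alt
  rw [pvFoldl_eq]
  omega
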